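-- pv_equiv track=rewrite | github.com/jfpardy/Advent25 | day2/python/day2_part1.py | sum_doubled_in_range
-- ===== SOURCE A (Python) =====
-- def sum_doubled_in_range(low, high):
--     total = 0
--     k = 1
--
--     while True:
--         multiplier = 10**k + 1
--         min_doubled = (10**(k-1) if k > 1 else 1) * multiplier
--
--         if min_doubled > high:
--             break
--
--         min_base = (low + multiplier - 1) // multiplier
--         max_base = high // multiplier
--
--         min_base = max(min_base, 10**(k-1)) if k > 1 else max(min_base, 1)
--         max_base = min(max_base, 10**k - 1)
--
--         if min_base <= max_base:
--             count = max_base - min_base + 1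
--             base_sum = (min_base + max_base) * count // 2
--             total += base_sum * multiplier
--
--         k += 1
--
--     return total
-- ===== SOURCE B (Python) =====
-- def sum_doubled_in_range(low, high):
--     # Scan bases directly: every "doubled" number is b * (10**len(str(b)) + 1);
--     # these values grow with b, so walk b = 1, 2, ... until the value exceeds high.
--     total = 0
--     b = 1
--     p = 10  # smallest power of 10 strictly greater than b
--     while b * (p + 1) <= high:
--         v = b * (p + 1)
--         if v >= low:
--             total += v
--         b += 1
--         if b == p:
--             p *= 10
--     return total
-- ===== Notes on version B (the rewrite author's own statement) =====
-- stated objective: simpler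
-- what changed: Replaces A's per-digit-length closed-form arithmetic-series summation (ceil/floor divisions, clamping, Gauss formula) with a plain walk over bases b = 1,2,... that adds b*(10^len(b)+1) whenever it lies in [low, high].
import Mathlib
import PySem

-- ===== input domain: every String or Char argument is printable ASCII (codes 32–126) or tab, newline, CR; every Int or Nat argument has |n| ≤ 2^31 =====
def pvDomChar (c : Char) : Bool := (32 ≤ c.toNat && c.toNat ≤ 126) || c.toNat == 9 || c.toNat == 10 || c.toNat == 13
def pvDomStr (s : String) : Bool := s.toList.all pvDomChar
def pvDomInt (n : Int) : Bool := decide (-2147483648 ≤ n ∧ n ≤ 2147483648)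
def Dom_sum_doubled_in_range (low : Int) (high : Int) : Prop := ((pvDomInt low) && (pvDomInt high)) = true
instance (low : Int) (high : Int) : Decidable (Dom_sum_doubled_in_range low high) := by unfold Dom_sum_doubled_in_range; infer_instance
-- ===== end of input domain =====

-- B walks over bases b = 1,2,... adding b*(10^len(b)+1) when in [low,high], instead of A's
-- per-digit-length closed-form series summation; simpler, not faster.


-- helper for termination: k < 10^k over Int
theorem pvA_k_lt_pow (k : Nat) : (k : Int) < (10:Int) ^ k := by
  have h : k < 10 ^ k := Nat.lt_pow_self (by norm_num)
  exact_mod_cast h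

-- ===== PORT A =====
-- literal transliteration of A's while-loop as recursion on k
def aLoop (low high : Int) (k : Nat) (total : Int) : Int :=
  let mult : Int := 10 ^ k + 1
  let min_doubled : Int := (if k > 1 then (10:Int) ^ (k - 1) else 1) * mult
  if min_doubled > high then total
  else
    let min_base0 := PySem.Int.floordiv (low + mult - 1) mult
    let max_base0 := PySem.Int.floordiv high mult
    let min_base := if k > 1 then max min_base0 ((10:Int) ^ (k - 1)) else max min_base0 1
    let max_base := min max_base0 ((10:Int) ^ k - 1)
    let total' := if min_base ≤ max_base then
        total + PySem.Int.floordiv ((min_base + max_base) * (max_base - min_base + 1)) 2 * mult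
      else total
    aLoop low high (k + 1) total'
termination_by high.toNat + 1 - k
decreasing_by
  rename_i hbr
  have hmd := not_lt.mp hbr
  simp only [min_doubled, mult, dite_eq_ite] at hmd
  have hk : (k : Int) < (10:Int) ^ k := pvA_k_lt_pow k
  have hpos : (1:Int) ≤ (if k > 1 then (10:Int) ^ (k - 1) else 1) := by
    split
    · exact one_le_pow₀ (by norm_num)
    · exact le_refl 1
  have h1 : (10:Int) ^ k + 1 ≤ (if k > 1 then (10:Int) ^ (k - 1) else 1) * ((10:Int) ^ k + 1) := by
    nlinarith [pow_pos (by norm_num : (0:Int) < 10) k]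
  have hkh : (k : Int) < high := by omega
  omega

def sum_doubled_in_range (low : Int) (high : Int) : Int := aLoop low high 1 0

-- ===== PORT B =====
-- literal transliteration of B's while-loop as recursion on b; the '1 ≤ b ∧ 1 ≤ p'
-- conjuncts are totality guards only — they hold on every state reachable from the
-- entry call (b = 1, p = 10) and are preserved by the loop body.
def altLoop (low high : Int) (b p total : Int) : Int :=
  if h : b * (p + 1) ≤ high ∧ 1 ≤ b ∧ 1 ≤ p then
    let v := b * (p + 1)
    let total' := if low ≤ v then total + v else total
    let b' := b + 1
    let p' := if b' = p then p * 10 else p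
    altLoop low high b' p' total'
  else total
termination_by (high + 1 - b).toNat
decreasing_by
  obtain ⟨h1, h2, h3⟩ := h
  have : 2 * b ≤ b * (p + 1) := by nlinarith
  have : b < high := by omega
  omega

def sum_doubled_in_range_alt (low : Int) (high : Int) : Int := altLoop low high 1 10 0

-- ===== PRECONDITION & SPEC =====
def Spec_sum_doubled_in_range (low : Int) (high : Int) (out : Int) : Prop := out = sum_doubled_in_range_alt low high
instance (low : Int) (high : Int) (out : Int) : Decidable (Spec_sum_doubled_in_range low high out) := by unfold Spec_sum_doubled_in_range; infer_instance

-- ===== CLAIM (what is proved, stated in full; the proofs are below) =====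
def Claim_equal_sum_doubled_in_range : Prop := ∀ (low : Int) (high : Int), Dom_sum_doubled_in_range low high → Spec_sum_doubled_in_range low high (sum_doubled_in_range low high)

-- ===== LEMMAS AND PROOFS =====

-- sum of the integers in [a, c]
def ISum (a c : Int) : Int :=
  if h : a ≤ c then c + ISum a (c - 1) else 0
termination_by (c + 1 - a).toNat
decreasing_by omega

theorem ISum_of_gt {a c : Int} (h : c < a) : ISum a c = 0 := by
  rw [ISum, dif_neg (not_le.mpr h)]

theorem ISum_single (a : Int) : ISum a a = a := by
  rw [ISum, dif_pos le_rfl, ISum_of_gt (by omega)]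
  omega

theorem ISum_peel {a c : Int} (h : a ≤ c) : ISum a c = a + ISum (a + 1) c := by
  have hn : ∀ n : Nat, ∀ a c : Int, a ≤ c → (c - a).toNat ≤ n → ISum a c = a + ISum (a + 1) c := by
    intro n
    induction n with
    | zero =>
      intro a c hac hm
      have he : a = c := by omega
      subst he
      rw [ISum_single, ISum_of_gt (by omega)]
      ring
    | succ n ih =>
      intro a c hac hm
      by_cases he : a = c
      · subst he
        rw [ISum_single, ISum_of_gt (by omega)]
        ring
      · have h1 : a ≤ c - 1 := by omega
        have h2 : a + 1 ≤ c := by omega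
        rw [ISum, dif_pos hac]
        rw [ih a (c - 1) h1 (by omega)]
        rw [show ISum (a + 1) c = c + ISum (a + 1) (c - 1) from by rw [ISum, dif_pos h2]]
        ring
  exact hn (c - a).toNat a c h le_rfl

theorem ISum_gauss {a c : Int} (h : a ≤ c) : 2 * ISum a c = (a + c) * (c - a + 1) := by
  have hn : ∀ n : Nat, ∀ c : Int, a ≤ c → (c - a).toNat ≤ n → 2 * ISum a c = (a + c) * (c - a + 1) := by
    intro n
    induction n with
    | zero =>
      intro c hac hm
      have : a = c := by omega
      subst this
      rw [ISum, dif_pos le_rfl, ISum_of_gt (by omega)]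
      ring
    | succ n ih =>
      intro c hac hm
      by_cases he : a = c
      · subst he
        rw [ISum, dif_pos le_rfl, ISum_of_gt (by omega)]
        ring
      · rw [ISum, dif_pos hac]
        have := ih (c - 1) (by omega) (by omega)
        ring_nf
        ring_nf at this
        linarith
  exact hn (c - a).toNat c h le_rfl

-- accumulator-free versions of the two loops
def gLoop (low high b p : Int) : Int :=
  if h : b * (p + 1) ≤ high ∧ 1 ≤ b ∧ 1 ≤ p then
    (if low ≤ b * (p + 1) then b * (p + 1) else 0) +
      gLoop low high (b + 1) (if b + 1 = p then p * 10 else p)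
  else 0
termination_by (high + 1 - b).toNat
decreasing_by
  obtain ⟨h1, h2, h3⟩ := h
  have : 2 * b ≤ b * (p + 1) := by nlinarith
  have : b < high := by omega
  omega

def hLoop (low high : Int) (k : Nat) : Int :=
  let mult : Int := 10 ^ k + 1
  let min_doubled : Int := (if k > 1 then (10:Int) ^ (k - 1) else 1) * mult
  if min_doubled > high then 0
  else
    let min_base0 := PySem.Int.floordiv (low + mult - 1) mult
    let max_base0 := PySem.Int.floordiv high mult
    let min_base := if k > 1 then max min_base0 ((10:Int) ^ (k - 1)) else max min_base0 1
    let max_base := min max_base0 ((10:Int) ^ k - 1)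
    (if min_base ≤ max_base then
        PySem.Int.floordiv ((min_base + max_base) * (max_base - min_base + 1)) 2 * mult
      else 0) + hLoop low high (k + 1)
termination_by high.toNat + 1 - k
decreasing_by
  rename_i hbr
  have hmd := not_lt.mp hbr
  simp only [min_doubled, mult, dite_eq_ite] at hmd
  have hk : (k : Int) < (10:Int) ^ k := pvA_k_lt_pow k
  have hpos : (1:Int) ≤ (if k > 1 then (10:Int) ^ (k - 1) else 1) := by
    split
    · exact one_le_pow₀ (by norm_num)
    · exact le_refl 1
  have h1 : (10:Int) ^ k + 1 ≤ (if k > 1 then (10:Int) ^ (k - 1) else 1) * ((10:Int) ^ k + 1) := by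
    nlinarith [pow_pos (by norm_num : (0:Int) < 10) k]
  have hkh : (k : Int) < high := by omega
  omega

theorem altLoop_acc (low high b p total : Int) :
    altLoop low high b p total = total + gLoop low high b p := by
  induction b, p, total using altLoop.induct low high with
  | case1 b p total h v total' b' p' ih =>
    rw [altLoop, dif_pos h, gLoop, dif_pos h]
    simp only [v, total', b', p', dite_eq_ite] at ih ⊢
    rw [ih]
    split_ifs <;> ring
  | case2 b p total h =>
    rw [altLoop, dif_neg h, gLoop, dif_neg h]
    ring

theorem aLoop_acc (low high : Int) (k : Nat) (total : Int) :
    aLoop low high k total = total + hLoop low high k := by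
  induction k, total using aLoop.induct low high with
  | case1 k total mult min_doubled h =>
    rw [aLoop, hLoop]
    simp only [mult, min_doubled, dite_eq_ite] at h ⊢
    rw [if_pos h, if_pos h]
    ring
  | case2 k total mult min_doubled h mb0 xb0 mb xb total' ih =>
    rw [aLoop, hLoop]
    simp only [mult, min_doubled, mb0, xb0, mb, xb, total', dite_eq_ite] at h ih ⊢
    rw [if_neg h, if_neg h]
    rw [ih]
    split_ifs <;> ring

theorem ceil_le_iff {low m b : Int} (hm : 0 < m) :
    PySem.Int.floordiv (low + m - 1) m ≤ b ↔ low ≤ b * m := by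
  have h1 := PySem.Int.floordiv_lt_iff_lt_mul (a := low + m - 1) (b := m) (q := b + 1) hm
  rw [add_mul, one_mul] at h1
  rw [← Int.lt_add_one_iff, h1]
  omega

-- one decade of B's walk equals the clamped interval sum plus the next decade's walk
theorem gLoop_decade (low high : Int) (k : Nat) :
    ∀ (n : Nat) (b : Int), (10:Int) ^ (k - 1) ≤ b → b < (10:Int) ^ k →
      ((10:Int) ^ k - b).toNat ≤ n →
      gLoop low high b ((10:Int) ^ k) =
        ((10:Int) ^ k + 1) *
            ISum (max b (PySem.Int.floordiv (low + ((10:Int) ^ k + 1) - 1) ((10:Int) ^ k + 1)))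
              (min (PySem.Int.floordiv high ((10:Int) ^ k + 1)) ((10:Int) ^ k - 1)) +
          gLoop low high ((10:Int) ^ k) ((10:Int) ^ (k + 1)) := by
  intro n
  induction n with
  | zero =>
    intro b _ hb2 hmeas
    exfalso
    omega
  | succ n ih =>
    intro b hb1 hb2 hmeas
    have hm0 : (0:Int) < (10:Int) ^ k + 1 := by positivity
    have hp1 : (1:Int) ≤ (10:Int) ^ k := one_le_pow₀ (by norm_num)
    have hb0 : (1:Int) ≤ b := le_trans (one_le_pow₀ (by norm_num)) hb1
    have hceil : PySem.Int.floordiv (low + ((10:Int) ^ k + 1) - 1) ((10:Int) ^ k + 1) ≤ b ↔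
        low ≤ b * ((10:Int) ^ k + 1) := ceil_le_iff hm0
    by_cases hg : b * ((10:Int) ^ k + 1) ≤ high
    · rw [gLoop, dif_pos ⟨hg, hb0, by linarith⟩]
      have hble : b ≤ PySem.Int.floordiv high ((10:Int) ^ k + 1) :=
        (PySem.Int.le_floordiv_iff_mul_le hm0).mpr hg
      have hbmb : b ≤ min (PySem.Int.floordiv high ((10:Int) ^ k + 1)) ((10:Int) ^ k - 1) :=
        le_min hble (by omega)
      by_cases hbp : b + 1 = (10:Int) ^ k
      · rw [if_pos hbp, hbp, ← pow_succ]
        have hmb_eq : min (PySem.Int.floordiv high ((10:Int) ^ k + 1)) ((10:Int) ^ k - 1) = b :=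
          le_antisymm (le_trans (min_le_right _ _) (by omega)) hbmb
        rw [hmb_eq]
        by_cases hlb : PySem.Int.floordiv (low + ((10:Int) ^ k + 1) - 1) ((10:Int) ^ k + 1) ≤ b
        · rw [if_pos (hceil.mp hlb), max_eq_left hlb, ISum_single]
          ring
        · rw [if_neg (fun h => hlb (hceil.mpr h)), max_eq_right (by omega), ISum_of_gt (by omega)]
          ring
      · rw [if_neg hbp]
        have hb2' : b + 1 < (10:Int) ^ k := lt_of_le_of_ne (by omega) hbp
        rw [ih (b + 1) (by omega) hb2' (by omega)]
        by_cases hlb : PySem.Int.floordiv (low + ((10:Int) ^ k + 1) - 1) ((10:Int) ^ k + 1) ≤ b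
        · rw [if_pos (hceil.mp hlb), max_eq_left hlb, max_eq_left (by omega),
            ISum_peel hbmb]
          ring
        · rw [if_neg (fun h => hlb (hceil.mpr h)), max_eq_right (by omega),
            max_eq_right (by omega)]
          ring
    · have hng : ¬(b * ((10:Int) ^ k + 1) ≤ high ∧ 1 ≤ b ∧ 1 ≤ (10:Int) ^ k) :=
        fun h => hg h.1
      rw [gLoop, dif_neg hng]
      have hhb : high < b * ((10:Int) ^ k + 1) := not_le.mp hg
      have hfd : PySem.Int.floordiv high ((10:Int) ^ k + 1) < b :=
        (PySem.Int.floordiv_lt_iff_lt_mul hm0).mpr hhb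
      rw [ISum_of_gt (lt_of_le_of_lt (min_le_left _ _) (lt_of_lt_of_le hfd (le_max_left _ _)))]
      have hnext : ¬((10:Int) ^ k * ((10:Int) ^ (k + 1) + 1) ≤ high ∧
          1 ≤ (10:Int) ^ k ∧ 1 ≤ (10:Int) ^ (k + 1)) := by
        rintro ⟨h1, -, -⟩
        have hps : (10:Int) ^ (k + 1) = 10 ^ k * 10 := pow_succ 10 k
        nlinarith [hp1, hhb, hb2, hm0]
      rw [show gLoop low high ((10:Int) ^ k) ((10:Int) ^ (k + 1)) = 0 from by
        rw [gLoop, dif_neg hnext]]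
      ring

theorem hLoop_eq_gLoop (low high : Int) :
    ∀ (n : Nat) (k : Nat), 1 ≤ k → high.toNat + 1 - k ≤ n →
      hLoop low high k = gLoop low high ((10:Int) ^ (k - 1)) ((10:Int) ^ k) := by
  intro n
  induction n with
  | zero =>
    intro k hk hmeas
    have hpref : (if k > 1 then (10:Int) ^ (k - 1) else 1) = (10:Int) ^ (k - 1) := by
      split
      · rfl
      · have : k = 1 := by omega
        subst this; norm_num
    have hk10 : (k : Int) < (10:Int) ^ k := pvA_k_lt_pow k
    have hp1 : (1:Int) ≤ (10:Int) ^ (k - 1) := one_le_pow₀ (by norm_num)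
    have hmd : high < (10:Int) ^ (k - 1) * ((10:Int) ^ k + 1) := by
      have h1 : (10:Int) ^ k + 1 ≤ (10:Int) ^ (k - 1) * ((10:Int) ^ k + 1) := by
        nlinarith [pow_pos (by norm_num : (0:Int) < 10) k]
      omega
    rw [hLoop]
    simp only [hpref]
    rw [if_pos (by exact hmd)]
    rw [show gLoop low high ((10:Int) ^ (k - 1)) ((10:Int) ^ k) = 0 from by
      rw [gLoop, dif_neg (fun h => absurd h.1 (not_le.mpr hmd))]]
  | succ n ih =>
    intro k hk hmeas
    have hpref : (if k > 1 then (10:Int) ^ (k - 1) else 1) = (10:Int) ^ (k - 1) := by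
      split
      · rfl
      · have : k = 1 := by omega
        subst this; norm_num
    have hk10 : (k : Int) < (10:Int) ^ k := pvA_k_lt_pow k
    have hp1 : (1:Int) ≤ (10:Int) ^ (k - 1) := one_le_pow₀ (by norm_num)
    by_cases hmd : (10:Int) ^ (k - 1) * ((10:Int) ^ k + 1) ≤ high
    · rw [hLoop]
      simp only [hpref]
      rw [if_neg (not_lt.mpr hmd)]
      have hklt : (k : Int) < high := by
        have h1 : (10:Int) ^ k + 1 ≤ (10:Int) ^ (k - 1) * ((10:Int) ^ k + 1) := by
          nlinarith [pow_pos (by norm_num : (0:Int) < 10) k]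
        omega
      have hpref2 : (if k > 1 then
            max (PySem.Int.floordiv (low + ((10:Int) ^ k + 1) - 1) ((10:Int) ^ k + 1))
              ((10:Int) ^ (k - 1))
          else max (PySem.Int.floordiv (low + ((10:Int) ^ k + 1) - 1) ((10:Int) ^ k + 1)) 1) =
          max ((10:Int) ^ (k - 1))
            (PySem.Int.floordiv (low + ((10:Int) ^ k + 1) - 1) ((10:Int) ^ k + 1)) := by
        split
        · exact max_comm _ _
        · have hk1 : k = 1 := by omega
          subst hk1
          rw [show ((10:Int) ^ (1 - 1)) = 1 from by norm_num]
          exact max_comm _ _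
      simp only [hpref2]
      rw [ih (k + 1) (by omega) (by omega)]
      have hdec := gLoop_decade low high k (((10:Int) ^ k - (10:Int) ^ (k - 1)).toNat)
        ((10:Int) ^ (k - 1)) le_rfl
        (by
          have : (10:Int) ^ (k - 1) * 10 = (10:Int) ^ k := by
            rw [← pow_succ]
            congr 1
            omega
          nlinarith)
        le_rfl
      rw [hdec]
      simp only [Nat.add_sub_cancel]
      congr 1
      set mnb := max ((10:Int) ^ (k - 1))
        (PySem.Int.floordiv (low + ((10:Int) ^ k + 1) - 1) ((10:Int) ^ k + 1)) with hmnb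
      set mxb := min (PySem.Int.floordiv high ((10:Int) ^ k + 1)) ((10:Int) ^ k - 1) with hmxb
      by_cases hle : mnb ≤ mxb
      · rw [if_pos hle]
        have hg := ISum_gauss hle
        rw [show (mnb + mxb) * (mxb - mnb + 1) = 2 * ISum mnb mxb from hg.symm]
        rw [PySem.Int.floordiv_eq_ediv_of_pos (by norm_num)]
        rw [Int.mul_ediv_cancel_left _ (by norm_num)]
        ring
      · rw [if_neg hle, ISum_of_gt (not_le.mp hle)]
        ring
    · rw [hLoop]
      simp only [hpref]
      rw [if_pos (not_le.mp hmd)]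
      rw [show gLoop low high ((10:Int) ^ (k - 1)) ((10:Int) ^ k) = 0 from by
        rw [gLoop, dif_neg (fun h => hmd h.1)]]

theorem sum_doubled_in_range_spec : Claim_equal_sum_doubled_in_range := by
  intro low high _
  unfold Spec_sum_doubled_in_range sum_doubled_in_range sum_doubled_in_range_alt
  rw [aLoop_acc, altLoop_acc]
  have h := hLoop_eq_gLoop low high (high.toNat) 1 le_rfl (by omega)
  norm_num at h
  rw [h]
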